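-- pv_equiv track=rewrite | github.com/will-duncan/p53mdm2 | ode_functions.py | upper_double_id
-- ===== SOURCE A (Python) =====
-- def upper_double_id(output):
--     '''
--     Returns label of "Large" or "Small" for a particular trajectory for parameter node where we expect birythmicity
--     to be of upper inner loop type.
--     Args:
--     output : list of arrays identifying domains through which trajectory passes (result of
--     get_periodic_domains(trajectory))
--     '''
--     newoutput = []#convert output from arrays to strings for easier checks
--     for i in output:
--         string = ''
--         for j in i:
--             string = string + str(j)
--         newoutput.append(string)
--
--     top_domains = ['200','100','000','210','110','010']
--     for domain in top_domains:
--         if domain in newoutput: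
--             return 'Large'
--         else:
--             pass
--     return 'Small'
-- ===== SOURCE B (Python) =====
-- def upper_double_id(output):
--     top_domains = {'200', '100', '000', '210', '110', '010'}
--     for i in output:
--         if ''.join(str(j) for j in i) in top_domains:
--             return 'Large'
--     return 'Small'
-- ===== Notes on version B (the rewrite author's own statement) =====
-- stated objective: simpler
-- what changed: Single fused pass over the trajectory domains testing each joined string against a fixed set, instead of first materialising the whole string list and then scanning the six labels over it.
import Mathlib
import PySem

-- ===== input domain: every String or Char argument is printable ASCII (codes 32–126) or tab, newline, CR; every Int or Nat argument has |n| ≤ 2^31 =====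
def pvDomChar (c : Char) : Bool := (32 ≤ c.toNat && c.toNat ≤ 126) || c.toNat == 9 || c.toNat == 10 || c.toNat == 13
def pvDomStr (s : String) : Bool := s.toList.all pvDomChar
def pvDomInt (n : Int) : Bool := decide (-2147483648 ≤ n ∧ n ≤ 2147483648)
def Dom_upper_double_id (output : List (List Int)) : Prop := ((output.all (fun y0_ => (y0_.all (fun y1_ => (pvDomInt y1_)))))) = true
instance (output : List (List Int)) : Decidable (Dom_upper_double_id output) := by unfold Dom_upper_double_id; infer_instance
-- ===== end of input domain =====

-- B fuses A's two phases into one pass over the trajectory domains (no intermediate string list); objective: simpler.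

-- ===== PORT A =====
-- the for-loop over top_domains with early return
def pvScanA : List String → List String → String
  | [], _ => "Small"
  | d :: rest, news => if news.contains d then "Large" else pvScanA rest news

def upper_double_id (output : List (List Int)) : String :=
  let newoutput := output.foldl (fun acc i => acc ++ [i.foldl (fun s j => s ++ PySem.Int.toStr j) ""]) []
  pvScanA ["200", "100", "000", "210", "110", "010"] newoutput

-- ===== PORT B =====
def upper_double_id_alt : List (List Int) → String
  | [] => "Small"
  | i :: rest =>
    if (PySem.Set.ofList ["200", "100", "000", "210", "110", "010"]).contains
        ((i.map PySem.Int.toStr).foldl (· ++ ·) "") then "Large"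
    else upper_double_id_alt rest

-- ===== PRECONDITION & SPEC =====
def Spec_upper_double_id (output : List (List Int)) (out : String) : Prop := out = upper_double_id_alt output
instance (output : List (List Int)) (out : String) : Decidable (Spec_upper_double_id output out) := by unfold Spec_upper_double_id; infer_instance

-- ===== CLAIM (what is proved, stated in full; the proofs are below) =====
def Claim_equal_upper_double_id : Prop := ∀ (output : List (List Int)), Dom_upper_double_id output → Spec_upper_double_id output (upper_double_id output)

-- ===== LEMMAS AND PROOFS =====

def pvJoin (i : List Int) : String := i.foldl (fun s j => s ++ PySem.Int.toStr j) ""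

def pvT : List String := ["200", "100", "000", "210", "110", "010"]

lemma pvScanA_eq (tops news : List String) :
    pvScanA tops news = if tops.any (fun d => news.contains d) then "Large" else "Small" := by
  induction tops with
  | nil => simp [pvScanA]
  | cons d rest ih =>
    simp only [pvScanA, List.any_cons]
    by_cases h : news.contains d = true
    · rw [if_pos h]
      simp only [List.contains_iff_mem] at h
      simp [h]
    · rw [if_neg h, ih]
      simp only [List.contains_iff_mem] at h
      simp [h]

lemma pvAlt_eq (output : List (List Int)) :
    upper_double_id_alt output =
      if output.any (fun i => pvT.contains (pvJoin i)) then "Large" else "Small" := by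
  induction output with
  | nil => simp [upper_double_id_alt]
  | cons i rest ih =>
    simp only [upper_double_id_alt, List.any_cons]
    have hset : (PySem.Set.ofList pvT).contains ((i.map PySem.Int.toStr).foldl (· ++ ·) "")
        = pvT.contains (pvJoin i) := by
      have hj : (i.map PySem.Int.toStr).foldl (· ++ ·) "" = pvJoin i := by
        simp [pvJoin, List.foldl_map]
      rw [hj, Bool.eq_iff_iff]
      simp [PySem.Set.mem_ofList]
    rw [show (["200", "100", "000", "210", "110", "010"] : List String) = pvT from rfl, hset]
    by_cases h : pvT.contains (pvJoin i) = true
    · rw [if_pos h]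
      simp only [List.contains_iff_mem] at h
      simp [h]
    · rw [if_neg h, ih]
      simp only [List.contains_iff_mem] at h
      simp [h]

lemma pvAny_swap (output : List (List Int)) :
    (pvT.any fun d => (output.map pvJoin).contains d) =
      (output.any fun i => pvT.contains (pvJoin i)) := by
  rw [Bool.eq_iff_iff]
  simp only [List.any_eq_true, List.contains_iff_mem, List.mem_map]
  constructor
  · rintro ⟨d, hd, i, hi, rfl⟩; exact ⟨i, hi, hd⟩
  · rintro ⟨i, hi, hd⟩; exact ⟨pvJoin i, hd, i, hi, rfl⟩

-- ===== VERDICT (by name: the statement is the Claim_ definition above) =====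
theorem upper_double_id_spec : Claim_equal_upper_double_id := by
  intro output _
  show upper_double_id output = upper_double_id_alt output
  rw [upper_double_id, pvAlt_eq]
  simp only [PySem.List.foldl_append_singleton_eq_map, List.nil_append]
  rw [show (List.foldl (fun s j => s ++ PySem.Int.toStr j) "") = pvJoin from rfl]
  rw [show (["200", "100", "000", "210", "110", "010"] : List String) = pvT from rfl]
  rw [pvScanA_eq, pvAny_swap]
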